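-- pv_equiv track=rewrite | github.com/bschmaus/linkedin-leadership-agent | agents/utils.py | extract_author_context
-- ===== SOURCE A (Python) =====
-- def extract_author_context(voice: str) -> str:
--     """Return only identity/audience sections from voice.md, stripping writing style."""
--     if not voice.strip():
--         return ""
--     skip_headers = {
--         "## how i write",
--         "## what i want readers to feel",
--         "## sentence rhythm",
--         "## things that feel authentic to me",
--         "## things that feel fake",
--     }
--     lines, capture, result = voice.splitlines(), False, []
--     for line in lines:
--         if line.startswith("## "):
--             capture = line.strip().lower() not in skip_headers
--         if capture:
--             result.append(line)
--     return "\n".join(result).strip()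
-- ===== SOURCE B (Python) =====
-- def extract_author_context(voice: str) -> str:
--     """Return only identity/audience sections from voice.md, stripping writing style."""
--     if not voice.strip():
--         return ""
--     skip_headers = {
--         "## how i write",
--         "## what i want readers to feel",
--         "## sentence rhythm",
--         "## things that feel authentic to me",
--         "## things that feel fake",
--     }
--     # Group lines into sections: a headerless preamble, then one section per '## ' header.
--     sections = []
--     cur_key, cur_lines = None, []
--     for line in voice.splitlines():
--         if line.startswith("## "):
--             sections.append((cur_key, cur_lines))
--             cur_key, cur_lines = line.strip().lower(), [line]
--         else:
--             cur_lines.append(line)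
--     sections.append((cur_key, cur_lines))
--     kept = [ls for key, ls in sections if key is not None and key not in skip_headers]
--     flat = [line for ls in kept for line in ls]
--     return "\n".join(flat).strip()
-- ===== Notes on version B (the rewrite author's own statement) =====
-- stated objective: alternative
-- what changed: B replaces A's line-by-line capture-flag loop with a two-phase decomposition: group the lines into header-tagged sections (plus a headerless preamble), then filter out skipped/headerless sections and flatten the kept ones.
import Mathlib
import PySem

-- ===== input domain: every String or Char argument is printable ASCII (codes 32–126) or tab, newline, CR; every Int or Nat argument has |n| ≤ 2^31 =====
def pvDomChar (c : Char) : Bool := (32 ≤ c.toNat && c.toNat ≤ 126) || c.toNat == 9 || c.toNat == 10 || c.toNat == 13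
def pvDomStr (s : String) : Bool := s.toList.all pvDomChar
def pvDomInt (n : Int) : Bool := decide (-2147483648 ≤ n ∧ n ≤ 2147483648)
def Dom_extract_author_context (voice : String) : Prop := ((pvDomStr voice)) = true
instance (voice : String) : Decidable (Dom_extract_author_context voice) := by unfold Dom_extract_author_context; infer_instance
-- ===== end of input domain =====

-- B regroups the lines into sections and filters them, instead of A's capture-flag scan; same cost, different shape (objective: alternative).

-- ===== PORT A =====
def pvSkipHeaders : PySem.Set String :=
  PySem.Set.ofList ["## how i write", "## what i want readers to feel", "## sentence rhythm",
    "## things that feel authentic to me", "## things that feel fake"]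

-- A's for-loop over lines with the (capture, result) state, transliterated as structural recursion.
def pvLoopA (lines : List String) (capture : Bool) (result : List String) : List String :=
  match lines with
  | [] => result
  | line :: rest =>
    let capture := if PySem.Str.startswith line "## " then
        !(PySem.Set.contains pvSkipHeaders (PySem.Str.lower (PySem.Str.strip line)))
      else capture
    pvLoopA rest capture (if capture then result ++ [line] else result)

def extract_author_context (voice : String) : String :=
  if PySem.Str.strip voice = "" then ""
  else PySem.Str.strip (PySem.Str.join "\n" (pvLoopA (PySem.Str.splitlines voice) false []))

-- ===== PORT B =====
-- grouping pass: a headerless preamble (key none), then one section per '## ' header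
def pvGroupB (lines : List String) (curKey : Option String) (curLines : List String) :
    List (Option String × List String) :=
  match lines with
  | [] => [(curKey, curLines)]
  | line :: rest =>
    if PySem.Str.startswith line "## " then
      (curKey, curLines) :: pvGroupB rest (some (PySem.Str.lower (PySem.Str.strip line))) [line]
    else pvGroupB rest curKey (curLines ++ [line])

-- 'key is not None and key not in skip_headers'
def pvKeepKey (key : Option String) : Bool :=
  match key with
  | none => false
  | some k => !(PySem.Set.contains pvSkipHeaders k)

def extract_author_context_alt (voice : String) : String :=
  if PySem.Str.strip voice = "" then ""
  else
    let sections := pvGroupB (PySem.Str.splitlines voice) none []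
    let kept := sections.filter (fun s => pvKeepKey s.1)
    let flat := kept.flatMap (·.2)
    PySem.Str.strip (PySem.Str.join "\n" flat)

-- ===== PRECONDITION & SPEC =====
def Spec_extract_author_context (voice : String) (out : String) : Prop := out = extract_author_context_alt voice
instance (voice : String) (out : String) : Decidable (Spec_extract_author_context voice out) := by unfold Spec_extract_author_context; infer_instance

-- ===== CLAIM (what is proved, stated in full; the proofs are below) =====
def Claim_equal_extract_author_context : Prop := ∀ (voice : String), Dom_extract_author_context voice → Spec_extract_author_context voice (extract_author_context voice)

-- ===== LEMMAS AND PROOFS =====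

theorem pvLoopA_eq_group (ls : List String) :
    ∀ (curKey : Option String) (curLines acc : List String),
      pvLoopA ls (pvKeepKey curKey) (acc ++ (if pvKeepKey curKey then curLines else []))
        = acc ++ ((pvGroupB ls curKey curLines).filter (fun s => pvKeepKey s.1)).flatMap (·.2) := by
  induction ls with
  | nil =>
    intro curKey curLines acc
    simp only [pvLoopA, pvGroupB, List.filter]
    by_cases h : pvKeepKey curKey = true <;> simp [h]
  | cons line rest ih =>
    intro curKey curLines acc
    by_cases h : PySem.Str.startswith line "## " = true
    · simp only [pvLoopA, pvGroupB, h, if_true]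
      have hA : (!(PySem.Set.contains pvSkipHeaders (PySem.Str.lower (PySem.Str.strip line))))
          = pvKeepKey (some (PySem.Str.lower (PySem.Str.strip line))) := by
        simp [pvKeepKey]
      rw [hA]
      have := ih (some (PySem.Str.lower (PySem.Str.strip line))) [line]
        (acc ++ (if pvKeepKey curKey then curLines else []))
      by_cases hk2 : pvKeepKey (some (PySem.Str.lower (PySem.Str.strip line))) = true <;>
        by_cases hk : pvKeepKey curKey = true <;>
          simp only [hk, hk2, if_true, if_false, List.filter, List.flatMap_cons,
            List.append_nil, List.append_assoc, Bool.false_eq_true] at this ⊢ <;>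
          simpa using this
    · simp only [pvLoopA, pvGroupB, h]
      have := ih curKey (curLines ++ [line]) acc
      by_cases hk : pvKeepKey curKey = true
      · simpa [hk, List.append_assoc] using this
      · simpa [hk] using this

theorem pvLoopA_main (ls : List String) :
    pvLoopA ls false [] = ((pvGroupB ls none []).filter (fun s => pvKeepKey s.1)).flatMap (·.2) := by
  have := pvLoopA_eq_group ls none [] []
  simpa [pvKeepKey] using this

-- ===== VERDICT (by name: the statement is the Claim_ definition above) =====
theorem extract_author_context_spec : Claim_equal_extract_author_context := by
  intro voice _
  unfold Spec_extract_author_context extract_author_context extract_author_context_alt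
  by_cases h : PySem.Str.strip voice = ""
  · simp [h]
  · simp [h, pvLoopA_main]
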